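-- pv_equiv track=rewrite | github.com/bhadraakshay/2048-Game | 2048.py | down_movement
-- ===== SOURCE A (Python) =====
-- def down_movement(game_box): #function for down movement
--     j=0
--     moved=False
--     for i in range(0,4): #looping through all the columns
--         if game_box[i][j]!=0 or game_box[i][j+1]!=0 or game_box[i][j+2]!=0 or game_box[i][j+3]!=0:
--             if game_box[i][j+3]==0:
--                 while game_box[i][j+3]==0:
--                     game_box[i][j+3]=game_box[i][j+2]
--                     game_box[i][j+2]=game_box[i][j+1]
--                     game_box[i][j+1]=game_box[i][j]
--                     game_box[i][j]=0
--                     moved=True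
--
--             if game_box[i][j+2]==0 and (game_box[i][j+1]!=0 or game_box[i][j]!=0):
--                 while game_box[i][j+2]==0:
--                     game_box[i][j+2]=game_box[i][j+1]
--                     game_box[i][j+1]=game_box[i][j]
--                     game_box[i][j]=0
--                     moved=True
--
--             if game_box[i][j+1]==0 and game_box[i][j]!=0:
--                 while game_box[i][j+1]==0:
--                     game_box[i][j+1]=game_box[i][j]
--                     game_box[i][j]=0
--                     moved=True
--     return moved
-- ===== SOURCE B (Python) =====
-- def down_movement(game_box):
--     moved = False
--     for i in range(4):
--         row = game_box[i][0:4]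
--         nz = [v for v in row if v != 0]
--         new = [0] * (4 - len(nz)) + nz
--         if new != row:
--             moved = True
--         game_box[i][0:4] = new
--     return moved
-- ===== Notes on version B (the rewrite author's own statement) =====
-- stated objective: simpler
-- what changed: Replaces A's three cascading while-loops that bubble zeros through fixed positions of each row by a single filter-and-rebuild pass per row (collect nonzeros, left-pad with zeros, compare with the original first four cells).
-- outside the precondition, e.g. on down_movement([[1, 2], [1, 2, 3, 4], [1, 2, 3, 4], [1, 2, 3, 4]]): A raises IndexError, B returns True
import Mathlib
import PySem

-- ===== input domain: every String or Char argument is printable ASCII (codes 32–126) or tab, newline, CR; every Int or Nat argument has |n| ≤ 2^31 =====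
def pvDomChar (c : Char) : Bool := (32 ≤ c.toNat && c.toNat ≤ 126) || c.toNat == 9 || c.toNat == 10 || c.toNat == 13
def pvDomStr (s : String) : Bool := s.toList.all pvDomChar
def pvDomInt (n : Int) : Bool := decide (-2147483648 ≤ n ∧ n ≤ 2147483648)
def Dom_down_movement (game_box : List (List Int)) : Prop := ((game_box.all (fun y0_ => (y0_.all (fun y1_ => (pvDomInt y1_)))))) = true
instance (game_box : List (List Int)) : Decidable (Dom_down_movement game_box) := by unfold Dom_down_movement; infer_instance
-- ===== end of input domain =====

-- B replaces A's three bubbling while-loops per row by one filter-and-rebuild pass (simpler).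
-- Both Pythons mutate game_box in place identically; the equivalence proved here is about the RETURN value.

-- ===== PORT A =====
-- state is (row[0], row[1], row[2], row[3], moved); rows are independent, so A's writes
-- to row i (never read at a later i) are modelled per row.
-- 'while row[3]==0: row[3]=row[2]; row[2]=row[1]; row[1]=row[0]; row[0]=0; moved=True'
-- (fuel 4 > the ≤3 iterations the loop makes whenever Python's loop terminates)
def pvWhile3 : Nat → Int × Int × Int × Int × Bool → Int × Int × Int × Int × Bool
  | 0, s => s
  | n + 1, (a, b, c, d, m) => if d == 0 then pvWhile3 n (0, a, b, c, true) else (a, b, c, d, m)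

-- 'while row[2]==0: row[2]=row[1]; row[1]=row[0]; row[0]=0; moved=True'
def pvWhile2 : Nat → Int × Int × Int × Int × Bool → Int × Int × Int × Int × Bool
  | 0, s => s
  | n + 1, (a, b, c, d, m) => if c == 0 then pvWhile2 n (0, a, b, d, true) else (a, b, c, d, m)

-- 'while row[1]==0: row[1]=row[0]; row[0]=0; moved=True'
def pvWhile1 : Nat → Int × Int × Int × Int × Bool → Int × Int × Int × Int × Bool
  | 0, s => s
  | n + 1, (a, b, c, d, m) => if b == 0 then pvWhile1 n (0, a, c, d, true) else (a, b, c, d, m)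

-- the body of A's for-loop for one row (j = 0)
def pvRowA (a b c d : Int) (m : Bool) : Int × Int × Int × Int × Bool :=
  if a != 0 || b != 0 || c != 0 || d != 0 then
    let s1 := if d == 0 then pvWhile3 4 (a, b, c, d, m) else (a, b, c, d, m)
    match s1 with
    | (a, b, c, d, m) =>
      let s2 := if c == 0 && (b != 0 || a != 0) then pvWhile2 3 (a, b, c, d, m) else (a, b, c, d, m)
      match s2 with
      | (a, b, c, d, m) =>
        if b == 0 && a != 0 then pvWhile1 2 (a, b, c, d, m) else (a, b, c, d, m)
  else (a, b, c, d, m)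

-- one step of 'for i in range(0,4)': none = IndexError (excluded by Pre_)
def pvStepA (game_box : List (List Int)) (acc : Option Bool) (i : Int) : Option Bool :=
  match acc with
  | none => none
  | some m =>
    match PySem.List.pyGet? game_box i with
    | none => none
    | some row =>
      match PySem.List.pyGet? row 0, PySem.List.pyGet? row 1,
            PySem.List.pyGet? row 2, PySem.List.pyGet? row 3 with
      | some a, some b, some c, some d => some (pvRowA a b c d m).2.2.2.2
      | _, _, _, _ => none

def down_movement (game_box : List (List Int)) : Bool :=
  (((PySem.List.pyRange 0 4 1).foldl (pvStepA game_box) (some false)).getD false)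

-- ===== PORT B =====
-- one row of Source B: row = game_box[i][0:4]; nz = nonzeros; new = [0]*(4-len(nz)) + nz
def pvRowB (row : List Int) : Bool :=
  let r4 := PySem.List.slice row (some 0) (some 4)
  let nz := r4.filter (fun v => v != 0)
  let new := List.replicate (4 - nz.length) 0 ++ nz
  new != r4

def pvStepB (game_box : List (List Int)) (acc : Option Bool) (i : Int) : Option Bool :=
  match acc with
  | none => none
  | some m =>
    match PySem.List.pyGet? game_box i with
    | none => none
    | some row => some (m || pvRowB row)

def down_movement_alt (game_box : List (List Int)) : Bool :=
  (((PySem.List.pyRange 0 4 1).foldl (pvStepB game_box) (some false)).getD false)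

-- ===== PRECONDITION & SPEC =====
-- exactly the inputs on which the Python A returns (A indexes game_box[0..3][0..3])
def Pre_down_movement (game_box : List (List Int)) : Prop :=
  4 ≤ game_box.length ∧ ∀ r ∈ game_box.take 4, 4 ≤ r.length
instance (game_box : List (List Int)) : Decidable (Pre_down_movement game_box) := by
  unfold Pre_down_movement; infer_instance

def pvWitness_down_movement : List (List Int) :=
  [[2, 0, 0, 4], [0, 0, 0, 0], [2, 2, 2, 2], [0, 8, 0, 0]]

def Spec_down_movement (game_box : List (List Int)) (out : Bool) : Prop := out = down_movement_alt game_box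
instance (game_box : List (List Int)) (out : Bool) : Decidable (Spec_down_movement game_box out) := by unfold Spec_down_movement; infer_instance

-- ===== CLAIM (what is proved, stated in full; the proofs are below) =====
def Claim_equal_down_movement : Prop := ∀ (game_box : List (List Int)), Dom_down_movement game_box → Pre_down_movement game_box → Spec_down_movement game_box (down_movement game_box)

-- ===== LEMMAS AND PROOFS =====

theorem pvGet1 {α : Type} (x0 x1 x2 x3 : α) (rest : List α) :
    PySem.List.pyGet? (x0 :: x1 :: x2 :: x3 :: rest) 1 = some x1 := by
  have h : (0:Int) ≤ ↑rest.length + 1 + 1 := by omega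
  simp [PySem.List.pyGet?, PySem.List.pyIdx?, h]

theorem pvGet2 {α : Type} (x0 x1 x2 x3 : α) (rest : List α) :
    PySem.List.pyGet? (x0 :: x1 :: x2 :: x3 :: rest) 2 = some x2 := by
  have h : (2:Int) ≤ ↑rest.length + 1 + 1 + 1 := by omega
  simp [PySem.List.pyGet?, PySem.List.pyIdx?, h]

theorem pvGet3 {α : Type} (x0 x1 x2 x3 : α) (rest : List α) :
    PySem.List.pyGet? (x0 :: x1 :: x2 :: x3 :: rest) 3 = some x3 := by
  have h : (3:Int) ≤ ↑rest.length + 1 + 1 + 1 := by omega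
  simp [PySem.List.pyGet?, PySem.List.pyIdx?, h]

-- B only looks at the first four entries of a row
theorem pvRowB_take (a b c d : Int) (t : List Int) :
    pvRowB (a :: b :: c :: d :: t) = pvRowB [a, b, c, d] := by
  simp [pvRowB, PySem.List.slice]

-- per-row agreement: A's bubbling sets moved exactly when B's rebuilt row differs
theorem pvRow_eq (a b c d : Int) (m : Bool) :
    (pvRowA a b c d m).2.2.2.2 = (m || pvRowB [a, b, c, d]) := by
  by_cases ha : a = 0 <;> by_cases hb : b = 0 <;> by_cases hc : c = 0 <;> by_cases hd : d = 0 <;>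
    simp [pvRowA, pvRowB, pvWhile1, pvWhile2, pvWhile3, PySem.List.slice, ha, hb, hc, hd, bne]

-- ===== VERDICT (by name: the statement is the Claim_ definition above) =====
theorem down_movement_spec : Claim_equal_down_movement := by
  intro gb _ hpre
  obtain ⟨hlen, hrows⟩ := hpre
  match gb, hlen with
  | r0 :: r1 :: r2 :: r3 :: rest, _ =>
    have h0 : 4 ≤ r0.length := hrows r0 (by simp)
    have h1 : 4 ≤ r1.length := hrows r1 (by simp)
    have h2 : 4 ≤ r2.length := hrows r2 (by simp)
    have h3 : 4 ≤ r3.length := hrows r3 (by simp)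
    match r0, h0, r1, h1, r2, h2, r3, h3 with
    | a0::b0::c0::d0::t0, _, a1::b1::c1::d1::t1, _, a2::b2::c2::d2::t2, _, a3::b3::c3::d3::t3, _ =>
      show down_movement _ = down_movement_alt _
      have hr : PySem.List.pyRange 0 4 1 = [0, 1, 2, 3] := by decide
      simp only [down_movement, down_movement_alt, hr, List.foldl, pvStepA, pvStepB]
      simp [pvGet1, pvGet2, pvGet3, pvRow_eq, pvRowB_take]
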